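-- pv_equiv track=rewrite | github.com/m1ttt/FCCToolkit | fastApi/ryf.py | simetrica
-- ===== SOURCE A (Python) =====
-- def simetrica(numX,numY):
--     alert = 0
--     for i in range(len(numX)):
--         for j in range(len(numX)):
--             if numY[i] == numX[j] and numX[i] == numY[j]:
--                 alert += 1
--     if alert == len(numX):
--         return "Si"
--     else:
--         return "No"
-- ===== SOURCE B (Python) =====
-- def simetrica(numX, numY):
--     cnt = {}
--     for p in zip(numX, numY):
--         cnt[p] = cnt.get(p, 0) + 1
--     alert = 0
--     for x, y in zip(numX, numY):
--         alert += cnt.get((y, x), 0)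
--     return "Si" if alert == len(numX) else "No"
-- ===== Notes on version B (the rewrite author's own statement) =====
-- stated objective: faster
-- what changed: Replaces the quadratic double loop over index pairs by one pass that builds a frequency dict of (x,y) pairs and one pass summing lookups of the swapped pair (y,x).
import Mathlib
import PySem

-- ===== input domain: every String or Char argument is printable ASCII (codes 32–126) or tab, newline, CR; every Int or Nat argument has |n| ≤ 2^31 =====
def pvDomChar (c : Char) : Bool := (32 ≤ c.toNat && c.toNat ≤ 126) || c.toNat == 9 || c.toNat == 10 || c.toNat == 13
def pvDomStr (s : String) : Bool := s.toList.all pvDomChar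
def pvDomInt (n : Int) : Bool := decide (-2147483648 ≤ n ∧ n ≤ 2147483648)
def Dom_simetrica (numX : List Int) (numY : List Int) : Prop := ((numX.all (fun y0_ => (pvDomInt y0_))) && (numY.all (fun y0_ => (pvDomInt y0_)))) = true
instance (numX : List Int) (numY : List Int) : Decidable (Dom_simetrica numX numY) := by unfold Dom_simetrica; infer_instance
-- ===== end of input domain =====

-- B replaces A's quadratic double loop by two linear passes over a frequency dict of (x,y) pairs (objective: faster).

-- ===== PORT A =====
-- literal transliteration of A's nested index loops
def simetrica (numX : List Int) (numY : List Int) : String :=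
  let n : Int := numX.length
  let alert : Int :=
    (PySem.List.pyRange 0 n 1).foldl (fun acc i =>
      (PySem.List.pyRange 0 n 1).foldl (fun acc2 j =>
        if PySem.List.pyGetD numY i 0 = PySem.List.pyGetD numX j 0 ∧
           PySem.List.pyGetD numX i 0 = PySem.List.pyGetD numY j 0
        then acc2 + 1 else acc2) acc) 0
  if alert = n then "Si" else "No"

-- ===== PORT B =====
-- literal transliteration of Source B: build a counting dict of pairs, then sum lookups of swapped pairs
def simetrica_alt (numX : List Int) (numY : List Int) : String :=
  let pairs := numX.zip numY
  let cnt : PySem.Dict (Int × Int) Int :=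
    pairs.foldl (fun d p => d.insert p (d.getD p 0 + 1)) PySem.Dict.empty
  let alert : Int := pairs.foldl (fun s p => s + cnt.getD (p.2, p.1) 0) 0
  if alert = (numX.length : Int) then "Si" else "No"

-- ===== PRECONDITION & SPEC =====
-- A indexes numY[i] for every i < len(numX) and raises IndexError when numY is shorter; exactly those inputs are excluded.
def Pre_simetrica (numX : List Int) (numY : List Int) : Prop := numX.length ≤ numY.length
instance (numX : List Int) (numY : List Int) : Decidable (Pre_simetrica numX numY) := by unfold Pre_simetrica; infer_instance
def pvWitness_simetrica : List Int × List Int := ([1, 2], [2, 1])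

def Spec_simetrica (numX : List Int) (numY : List Int) (out : String) : Prop := out = simetrica_alt numX numY
instance (numX : List Int) (numY : List Int) (out : String) : Decidable (Spec_simetrica numX numY out) := by unfold Spec_simetrica; infer_instance

-- ===== CLAIM (what is proved, stated in full; the proofs are below) =====
def Claim_equal_simetrica : Prop := ∀ (numX : List Int) (numY : List Int), Dom_simetrica numX numY → Pre_simetrica numX numY → Spec_simetrica numX numY (simetrica numX numY)

-- ===== LEMMAS AND PROOFS =====

-- zip as an indexed comprehension, valid when the left list is at most as long as the right one
theorem pv_zip_eq_map_range (xs ys : List Int) (h : xs.length ≤ ys.length) :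
    xs.zip ys = (List.range xs.length).map (fun k => (xs.getD k 0, ys.getD k 0)) := by
  induction xs generalizing ys with
  | nil => simp
  | cons x xs ih =>
    cases ys with
    | nil => simp at h
    | cons y ys =>
      simp only [List.zip_cons_cons, List.length_cons, List.range_succ_eq_map,
        List.map_cons, List.map_map]
      refine congrArg₂ _ rfl ?_
      rw [ih ys (by simpa using h)]
      rfl

theorem pv_count_zip (numX numY : List Int) (h : numX.length ≤ numY.length) (a b : Int) :
    (numX.zip numY).count (a, b)
      = (List.range numX.length).countP (fun j => decide (a = numX.getD j 0 ∧ b = numY.getD j 0)) := by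
  rw [pv_zip_eq_map_range numX numY h, List.count_eq_countP, List.countP_map]
  refine List.countP_congr ?_
  intro j _
  simp only [Function.comp_apply, beq_iff_eq, Prod.mk.injEq, decide_eq_true_eq]
  constructor
  · rintro ⟨h1, h2⟩; exact ⟨h1.symm, h2.symm⟩
  · rintro ⟨h1, h2⟩; exact ⟨h1.symm, h2.symm⟩

theorem simetrica_spec : Claim_equal_simetrica := by
  intro numX numY _ hpre
  unfold Spec_simetrica
  unfold simetrica simetrica_alt
  dsimp only
  -- B side: the dict is a counter, lookups are counts, the loop is a sum
  rw [PySem.Dict.foldl_insert_getD_add_one_eq_counter, PySem.List.foldl_add]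
  simp only [PySem.Dict.getD_counter, zero_add]
  -- A side: ranges of ints are mapped ranges of nats
  rw [PySem.List.pyRange_one]
  simp only [Int.sub_zero, Int.toNat_natCast, List.foldl_map, zero_add]
  -- inner loop of A = a countP over the index range
  have hA : ∀ (i : Int) (acc : Int),
      (List.range numX.length).foldl (fun acc2 (k : Nat) =>
        if PySem.List.pyGetD numY i 0 = PySem.List.pyGetD numX ((k : Int)) 0 ∧
           PySem.List.pyGetD numX i 0 = PySem.List.pyGetD numY ((k : Int)) 0
        then acc2 + 1 else acc2) acc
      = acc + ((List.range numX.length).countP (fun k =>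
          decide (PySem.List.pyGetD numY i 0 = numX.getD k 0 ∧
                  PySem.List.pyGetD numX i 0 = numY.getD k 0)) : Int) := by
    intro i acc
    have h0 := PySem.List.foldl_count_if (fun k : Nat =>
      decide (PySem.List.pyGetD numY i 0 = numX.getD k 0 ∧
              PySem.List.pyGetD numX i 0 = numY.getD k 0)) (List.range numX.length) acc
    simp only [decide_eq_true_eq] at h0
    rw [← h0]
    refine List.foldl_ext _ _ acc ?_
    intro b k _
    simp only [PySem.List.pyGetD_natCast]
  simp only [hA]
  rw [PySem.List.foldl_add]
  simp only [zero_add]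
  -- both sides are now sums over the same index range; compare termwise
  rw [pv_zip_eq_map_range numX numY hpre, List.map_map]
  congr 1
  congr 1
  congr 1
  refine List.map_congr_left ?_
  intro k _
  simp only [Function.comp_apply, PySem.List.pyGetD_natCast]
  rw [← pv_zip_eq_map_range numX numY hpre, pv_count_zip numX numY hpre]
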